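-- pv_equiv track=rewrite | github.com/LukasWolff2002/Particle-Tracking-Velocimetry-Improving-Via-Deep-Learning | Graphs/YOLO/Eficiencia/eficienci.py | compute_fibers_tracked_by_frame
-- ===== SOURCE A (Python) =====
-- def compute_fibers_tracked_by_frame(datos):
--     """
--     Retorna (frames_eje_x, fibras_acumuladas_eje_y), donde:
--       - frames_eje_x = [1, 2, ..., max_frame_en_datos]
--       - fibras_acumuladas_eje_y[i] = cuántas fibras han aparecido
--         en frame <= frames_eje_x[i].
--     """
--     fibra_min_frame = {}
--     max_frame_global = 0
--
--     for key, value in datos.items():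
--         if key in ("ruta", "fibras_por_frame"):
--             continue
--
--         lista_frames = value.get("frame", [])
--         if not lista_frames:
--             continue
--
--         frames_planos = [f[0] for f in lista_frames]
--         min_fr = min(frames_planos)
--         fibra_min_frame[key] = min_fr
--         max_frame_global = max(max_frame_global, max(frames_planos))
--
--     frames_eje_x = []
--     fibras_acumuladas_eje_y = []
--
--     for f in range(1, max_frame_global + 1):
--         count = sum(1 for fr in fibra_min_frame.values() if fr <= f)
--         frames_eje_x.append(f)
--         fibras_acumuladas_eje_y.append(count)
--
--     return frames_eje_x, fibras_acumuladas_eje_y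
-- ===== SOURCE B (Python) =====
-- def compute_fibers_tracked_by_frame(datos):
--     # One pass to collect each fiber's first frame and the global max frame,
--     # then bucket-count first frames and emit the curve by a running prefix sum.
--     mins = []
--     max_frame = 0
--     for key, value in datos.items():
--         if key in ("ruta", "fibras_por_frame"):
--             continue
--         lista = value.get("frame", [])
--         if not lista:
--             continue
--         mn = mx = lista[0][0]
--         for f in lista[1:]:
--             v = f[0]
--             if v < mn:
--                 mn = v
--             if v > mx:
--                 mx = v
--         mins.append(mn)
--         if mx > max_frame:
--             max_frame = mx
--     bucket = {}
--     for m in mins: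
--         i = m if m > 1 else 1
--         bucket[i] = bucket.get(i, 0) + 1
--     xs = []
--     ys = []
--     run = 0
--     for f in range(1, max_frame + 1):
--         run += bucket.get(f, 0)
--         xs.append(f)
--         ys.append(run)
--     return xs, ys
-- ===== Notes on version B (the rewrite author's own statement) =====
-- stated objective: alternative
-- what changed: B makes one pass computing each fiber's min/max frame, then bucket-counts first-appearance frames in a dict and emits the cumulative curve with a single running prefix sum, instead of A's rescan of all first frames at every frame of the x-axis.
import Mathlib
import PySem

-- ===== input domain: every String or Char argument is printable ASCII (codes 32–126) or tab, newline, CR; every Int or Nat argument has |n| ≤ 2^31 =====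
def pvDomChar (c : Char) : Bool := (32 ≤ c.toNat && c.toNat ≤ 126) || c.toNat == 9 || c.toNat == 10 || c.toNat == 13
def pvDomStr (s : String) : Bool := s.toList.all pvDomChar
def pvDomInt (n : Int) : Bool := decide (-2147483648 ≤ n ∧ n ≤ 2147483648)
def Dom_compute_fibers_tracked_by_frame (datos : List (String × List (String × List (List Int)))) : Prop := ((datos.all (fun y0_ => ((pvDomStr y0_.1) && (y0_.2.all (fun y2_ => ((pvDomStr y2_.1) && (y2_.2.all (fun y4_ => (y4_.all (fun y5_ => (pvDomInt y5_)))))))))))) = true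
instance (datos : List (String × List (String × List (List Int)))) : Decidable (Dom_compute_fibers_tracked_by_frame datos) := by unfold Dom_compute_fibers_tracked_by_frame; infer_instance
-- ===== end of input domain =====

-- B replaces A's per-frame rescan of all first-appearance frames by a bucket
-- count of (clamped) first frames plus one running prefix sum (alternative algorithm).
-- datos is a Python dict: both ports decode the association list through
-- PySem.Dict.ofList (first key position, last value), exactly as dict(...) does.

-- ===== PORT A =====
-- one iteration of A's first loop; state = (fibra_min_frame, max_frame_global)
def pvAStep (st : PySem.Dict String Int × Int)
    (p : String × List (String × List (List Int))) : PySem.Dict String Int × Int :=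
  if p.1 == "ruta" || p.1 == "fibras_por_frame" then st
  else
    let lista_frames := (PySem.Dict.ofList p.2).getD "frame" []
    if lista_frames == [] then st
    else
      -- f[0]: pyGet? is none on an empty inner list (IndexError) — excluded by Pre_
      let frames_planos := lista_frames.map (fun f => (PySem.List.pyGet? f 0).getD 0)
      (st.1.insert p.1 ((PySem.List.min? frames_planos (fun x => x)).getD 0),
       max st.2 ((PySem.List.max? frames_planos (fun x => x)).getD 0))

def compute_fibers_tracked_by_frame (datos : List (String × List (String × List (List Int)))) : List Int × List Int :=
  let st := ((PySem.Dict.ofList datos).items).foldl pvAStep (PySem.Dict.empty, 0)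
  (PySem.List.pyRange 1 (st.2 + 1)).foldl
    (fun acc f =>
      let count := ((st.1.values).map (fun fr => if fr ≤ f then (1 : Int) else 0)).sum
      (acc.1 ++ [f], acc.2 ++ [count]))
    ([], [])

-- ===== PORT B =====
-- one iteration of B's first loop; state = (mins, max_frame)
def pvBStep (st : List Int × Int)
    (p : String × List (String × List (List Int))) : List Int × Int :=
  if p.1 == "ruta" || p.1 == "fibras_por_frame" then st
  else
    let lista := (PySem.Dict.ofList p.2).getD "frame" []
    if lista == [] then st
    else
      -- mn = mx = lista[0][0]  (pyGet? none = IndexError, excluded by Pre_)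
      let h := (PySem.List.pyGet? ((PySem.List.pyGet? lista 0).getD []) 0).getD 0
      let mm := (PySem.List.slice lista (some 1)).foldl
        (fun q f =>
          let v := (PySem.List.pyGet? f 0).getD 0
          (if v < q.1 then v else q.1, if v > q.2 then v else q.2)) (h, h)
      (st.1 ++ [mm.1], if mm.2 > st.2 then mm.2 else st.2)

def compute_fibers_tracked_by_frame_alt (datos : List (String × List (String × List (List Int)))) : List Int × List Int :=
  let st := ((PySem.Dict.ofList datos).items).foldl pvBStep ([], 0)
  let bucket := st.1.foldl
    (fun d m => let i := if m > 1 then m else 1; d.insert i (d.getD i 0 + 1))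
    PySem.Dict.empty
  let fin := (PySem.List.pyRange 1 (st.2 + 1)).foldl
    (fun acc f =>
      let run := acc.2.2 + bucket.getD f 0
      (acc.1 ++ [f], acc.2.1 ++ [run], run))
    ([], [], 0)
  (fin.1, fin.2.1)

-- ===== PRECONDITION & SPEC =====
-- Pre_ excludes exactly the inputs on which A raises IndexError: a fiber entry
-- whose "frame" list is nonempty but contains an empty point list (f[0] fails).
def Pre_compute_fibers_tracked_by_frame (datos : List (String × List (String × List (List Int)))) : Prop :=
  ∀ p ∈ (PySem.Dict.ofList datos).items,
    ¬(p.1 = "ruta" ∨ p.1 = "fibras_por_frame") →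
      ∀ l ∈ (PySem.Dict.ofList p.2).getD "frame" [], l ≠ []
instance (datos : List (String × List (String × List (List Int)))) : Decidable (Pre_compute_fibers_tracked_by_frame datos) := by unfold Pre_compute_fibers_tracked_by_frame; infer_instance

def pvWitness_compute_fibers_tracked_by_frame : (List (String × List (String × List (List Int)))) :=
  [("f1", [("frame", [[3, 0], [1, 5], [2, 2]])]), ("ruta", []), ("f2", [("frame", [[2, 1]])])]

def Spec_compute_fibers_tracked_by_frame (datos : List (String × List (String × List (List Int)))) (out : List Int × List Int) : Prop := out = compute_fibers_tracked_by_frame_alt datos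
instance (datos : List (String × List (String × List (List Int)))) (out : List Int × List Int) : Decidable (Spec_compute_fibers_tracked_by_frame datos out) := by unfold Spec_compute_fibers_tracked_by_frame; infer_instance

-- ===== CLAIM (what is proved, stated in full; the proofs are below) =====
def Claim_equal_compute_fibers_tracked_by_frame : Prop := ∀ (datos : List (String × List (String × List (List Int)))), Dom_compute_fibers_tracked_by_frame datos → Pre_compute_fibers_tracked_by_frame datos → Spec_compute_fibers_tracked_by_frame datos (compute_fibers_tracked_by_frame datos)

-- ===== LEMMAS AND PROOFS =====

-- proof-only helpers: per-entry min/max and the common first-phase characterisation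
def pvF0 (f : List Int) : Int := (PySem.List.pyGet? f 0).getD 0

def pvKeep (p : String × List (String × List (List Int))) : Bool :=
  !(p.1 == "ruta" || p.1 == "fibras_por_frame") &&
  !((PySem.Dict.ofList p.2).getD "frame" [] == [])

def pvPlanos (p : String × List (String × List (List Int))) : List Int :=
  ((PySem.Dict.ofList p.2).getD "frame" []).map pvF0

def pvMn (p : String × List (String × List (List Int))) : Int :=
  (PySem.List.min? (pvPlanos p) (fun x => x)).getD 0

def pvMx (p : String × List (String × List (List Int))) : Int :=
  (PySem.List.max? (pvPlanos p) (fun x => x)).getD 0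

def pvClamp (m : Int) : Int := if m > 1 then m else 1

def pvGStep (g : Int) (p : String × List (String × List (List Int))) : Int :=
  if pvKeep p then max g (pvMx p) else g

theorem pvAStep_eq (st : PySem.Dict String Int × Int)
    (p : String × List (String × List (List Int))) :
    pvAStep st p
      = ((if pvKeep p then st.1.insert p.1 (pvMn p) else st.1), pvGStep st.2 p) := by
  unfold pvAStep pvGStep pvKeep pvMn pvMx pvPlanos pvF0
  by_cases h1 : (p.1 == "ruta" || p.1 == "fibras_por_frame") = true
  · simp [h1]
  · by_cases h2 : ((PySem.Dict.ofList p.2).getD "frame" [] == []) = true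
    · simp [h1, h2]
    · simp [h1, h2]

theorem pvA_fold (l : List (String × List (String × List (List Int))))
    (d : PySem.Dict String Int) (g : Int) :
    l.foldl pvAStep (d, g)
      = (l.foldl (fun d' p => if pvKeep p then d'.insert p.1 (pvMn p) else d') d,
         l.foldl pvGStep g) := by
  have hstep : pvAStep = fun (st : PySem.Dict String Int × Int) p =>
      ((fun d' q => if pvKeep q then d'.insert q.1 (pvMn q) else d') st.1 p,
       (fun g' q => pvGStep g' q) st.2 p) := by
    funext st p; exact pvAStep_eq st p
  rw [hstep]
  exact PySem.List.foldl_prod_mk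
    (fun d' q => if pvKeep q then d'.insert q.1 (pvMn q) else d') pvGStep l d g

theorem pvB_entry (x : List Int) (t : List (List Int)) :
    ((PySem.List.slice (x :: t) (some 1)).foldl
      (fun q f =>
        let v := (PySem.List.pyGet? f 0).getD 0
        (if v < q.1 then v else q.1, if v > q.2 then v else q.2))
      ((PySem.List.pyGet? ((PySem.List.pyGet? (x :: t) 0).getD []) 0).getD 0,
       (PySem.List.pyGet? ((PySem.List.pyGet? (x :: t) 0).getD []) 0).getD 0))
    = ((PySem.List.min? ((x :: t).map pvF0) (fun y => y)).getD 0,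
       (PySem.List.max? ((x :: t).map pvF0) (fun y => y)).getD 0) := by
  have hget : (PySem.List.pyGet? (x :: t) 0).getD [] = x := by simp
  have hslice : PySem.List.slice (x :: t) (some 1) = t := by
    rw [PySem.List.slice_from _ (by norm_num)]; rfl
  have hstep : (fun (q : Int × Int) (f : List Int) =>
        let v := (PySem.List.pyGet? f 0).getD 0
        (if v < q.1 then v else q.1, if v > q.2 then v else q.2))
      = fun q f => (min q.1 (pvF0 f), max q.2 (pvF0 f)) := by
    funext q f
    refine Prod.ext ?_ ?_ <;> simp [pvF0] <;> omega
  rw [hget, hslice, hstep,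
    PySem.List.foldl_prod_mk (f := fun a f => min a (pvF0 f)) (g := fun b f => max b (pvF0 f))]
  have h1 : t.foldl (fun a f => min a (pvF0 f)) (pvF0 x) = (t.map pvF0).foldl min (pvF0 x) := by
    rw [List.foldl_map]
  have h2 : t.foldl (fun a f => max a (pvF0 f)) (pvF0 x) = (t.map pvF0).foldl max (pvF0 x) := by
    rw [List.foldl_map]
  have hx : ((PySem.List.pyGet? x 0).getD 0 : Int) = pvF0 x := rfl
  rw [hx, h1, h2, List.map_cons, PySem.List.min?_id_cons, PySem.List.max?_id_cons]
  rfl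

theorem pvBStep_eq (st : List Int × Int)
    (p : String × List (String × List (List Int))) :
    pvBStep st p
      = ((if pvKeep p then st.1 ++ [pvMn p] else st.1), pvGStep st.2 p) := by
  by_cases h1 : (p.1 == "ruta" || p.1 == "fibras_por_frame") = true
  · simp [pvBStep, pvGStep, pvKeep, h1]
  · by_cases h2 : ((PySem.Dict.ofList p.2).getD "frame" [] == []) = true
    · simp [pvBStep, pvGStep, pvKeep, h1, h2]
    · obtain ⟨x, t', hxt⟩ : ∃ x t', (PySem.Dict.ofList p.2).getD "frame" [] = x :: t' := by
        cases hh : (PySem.Dict.ofList p.2).getD "frame" [] with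
        | nil => rw [hh] at h2; simp at h2
        | cons x t' => exact ⟨x, t', rfl⟩
      unfold pvBStep pvGStep pvKeep pvMn pvMx pvPlanos
      simp only [h1, h2, hxt, Bool.false_eq_true, if_false, Bool.not_false, Bool.and_self,
        if_true, pvB_entry x t']
      have hmax : ∀ a b : Int, (if a > b then a else b) = max b a := by intro a b; omega
      simp [h1, h2, hmax]

theorem pvB_fold (l : List (String × List (String × List (List Int))))
    (ms : List Int) (g : Int) :
    l.foldl pvBStep (ms, g)
      = (l.foldl (fun a p => if pvKeep p then a ++ [pvMn p] else a) ms,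
         l.foldl pvGStep g) := by
  have hstep : pvBStep = fun (st : List Int × Int) p =>
      ((fun a q => if pvKeep q then a ++ [pvMn q] else a) st.1 p,
       (fun g' q => pvGStep g' q) st.2 p) := by
    funext st p; exact pvBStep_eq st p
  rw [hstep]
  exact PySem.List.foldl_prod_mk
    (fun a q => if pvKeep q then a ++ [pvMn q] else a) pvGStep l ms g

theorem pvCountP_succ (cs : List Int) (k : Int) :
    cs.countP (fun m => m ≤ k) = cs.countP (fun m => m ≤ k - 1) + cs.count k := by
  induction cs with
  | nil => simp
  | cons a t ih =>
    simp only [List.countP_cons, List.count_cons, ih]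
    by_cases h : a = k <;> by_cases h2 : a ≤ k - 1 <;> by_cases h3 : a ≤ k <;>
      simp [h, h2, h3] <;> omega

theorem pvBucket_eq (ms : List Int) :
    ms.foldl (fun d m =>
        let i := if m > 1 then m else 1
        d.insert i (d.getD i 0 + 1)) PySem.Dict.empty
      = PySem.Dict.counter (ms.map pvClamp) := by
  rw [← PySem.Dict.foldl_insert_getD_add_one_eq_counter, List.foldl_map]
  rfl

theorem pvBloop (cs : List Int) (h1 : ∀ m ∈ cs, 1 ≤ m) (n : Nat) :
    (PySem.List.pyRange 1 ((n : Int) + 1)).foldl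
      (fun acc f =>
        let run := acc.2.2 + (PySem.Dict.counter cs).getD f 0
        (acc.1 ++ [f], acc.2.1 ++ [run], run))
      (([], [], 0) : List Int × List Int × Int)
    = (PySem.List.pyRange 1 ((n : Int) + 1),
       (PySem.List.pyRange 1 ((n : Int) + 1)).map (fun f => (cs.countP (fun m => m ≤ f) : Int)),
       (cs.countP (fun m => m ≤ (n : Int)) : Int)) := by
  induction n with
  | zero =>
    have hr : PySem.List.pyRange 1 ((0 : Nat) + 1 : Int) = [] := by decide
    have hc : cs.countP (fun m => m ≤ ((0 : Nat) : Int)) = 0 :=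
      List.countP_eq_zero.mpr (by intro m hm; simpa using by have := h1 m hm; omega)
    rw [hr, hc]
    simp
  | succ n ih =>
    have hcast : ((n + 1 : Nat) : Int) + 1 = ((n : Int) + 1) + 1 := by push_cast; ring
    have hr : PySem.List.pyRange 1 (((n + 1 : Nat) : Int) + 1)
        = PySem.List.pyRange 1 ((n : Int) + 1) ++ [(n : Int) + 1] := by
      rw [hcast, PySem.List.pyRange_one_succ_right (by omega)]
    rw [hr, List.foldl_append, ih]
    have hcount : (PySem.Dict.counter cs).getD ((n : Int) + 1) 0
        = (cs.count ((n : Int) + 1) : Int) := PySem.Dict.getD_counter cs _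
    have hsucc : cs.countP (fun m => m ≤ ((n : Int) + 1))
        = cs.countP (fun m => m ≤ (n : Int)) + cs.count ((n : Int) + 1) := by
      have := pvCountP_succ cs ((n : Int) + 1)
      simpa using this
    simp only [List.foldl_cons, List.foldl_nil, List.map_append, List.map_cons, List.map_nil,
      hcount]
    refine Prod.ext rfl (Prod.ext ?_ ?_) <;> push_cast [hsucc] <;> simp [hcast]

theorem pvG_nonneg (l : List (String × List (String × List (List Int)))) (g : Int)
    (hg : 0 ≤ g) : 0 ≤ l.foldl pvGStep g := by
  induction l generalizing g with
  | nil => exact hg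
  | cons p t ih =>
    apply ih
    unfold pvGStep
    split
    · exact le_trans hg (le_max_left _ _)
    · exact hg

theorem pvClamp_countP (ms : List Int) (f : Int) (hf : 1 ≤ f) :
    (ms.map pvClamp).countP (fun m => m ≤ f) = ms.countP (fun m => m ≤ f) := by
  rw [List.countP_map]
  refine List.countP_congr ?_
  intro m _
  simp only [Function.comp, pvClamp]
  by_cases h : m > 1 <;> simp [h] <;> omega


theorem pvVals (L : List (String × List (String × List (List Int))))
    (hnd : (L.map (fun p => p.1)).Nodup) :
    (L.foldl (fun d' p => if pvKeep p then d'.insert p.1 (pvMn p) else d') PySem.Dict.empty).values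
      = L.foldl (fun a p => if pvKeep p then a ++ [pvMn p] else a) [] := by
  refine Eq.trans (congrArg PySem.Dict.values
    (PySem.List.foldl_if_eq_foldl_filter pvKeep (fun d' p => d'.insert p.1 (pvMn p)) L
      PySem.Dict.empty)) ?_
  refine Eq.trans ?_ (PySem.List.foldl_append_if pvKeep pvMn L []).symm
  have hfresh : ∀ p ∈ L.filter pvKeep, (PySem.Dict.empty : PySem.Dict String Int).contains p.1 = false := by
    intro p _; exact PySem.Dict.contains_empty _
  have hnd' : ((L.filter pvKeep).map (fun p => p.1)).Nodup :=
    ((List.filter_sublist (p := pvKeep)).map (fun p => p.1)).nodup hnd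
  have hitems := PySem.Dict.items_foldl_insert_fresh (L.filter pvKeep)
    (fun p => p.1) pvMn PySem.Dict.empty hfresh hnd'
  simp only [PySem.Dict.values, hitems]
  simp only [List.map_append, List.map_map]
  simp [Function.comp_def, PySem.Dict.empty]

theorem pvSecond (ms : List Int) (n : Nat) :
    (PySem.List.pyRange 1 ((n : Int) + 1)).foldl
      (fun acc f =>
        (acc.1 ++ [f], acc.2 ++ [(ms.map (fun fr => if fr ≤ f then (1 : Int) else 0)).sum]))
      (([], []) : List Int × List Int)
    = (let bucket := ms.foldl
          (fun d m => let i := if m > 1 then m else 1; d.insert i (d.getD i 0 + 1))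
          PySem.Dict.empty
       let fin := (PySem.List.pyRange 1 ((n : Int) + 1)).foldl
          (fun acc f =>
            let run := acc.2.2 + bucket.getD f 0
            (acc.1 ++ [f], acc.2.1 ++ [run], run))
          (([], [], 0) : List Int × List Int × Int)
       (fin.1, fin.2.1)) := by
  have hsplit : (PySem.List.pyRange 1 ((n : Int) + 1)).foldl
      (fun acc f =>
        (acc.1 ++ [f], acc.2 ++ [(ms.map (fun fr => if fr ≤ f then (1 : Int) else 0)).sum]))
      (([], []) : List Int × List Int)
    = ((PySem.List.pyRange 1 ((n : Int) + 1)).foldl (fun xs f => xs ++ [f]) [],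
       (PySem.List.pyRange 1 ((n : Int) + 1)).foldl
         (fun ys f => ys ++ [(ms.map (fun fr => if fr ≤ f then (1 : Int) else 0)).sum]) []) :=
    PySem.List.foldl_prod_mk (f := fun (xs : List Int) (f : Int) => xs ++ [f])
      (g := fun (ys : List Int) (f : Int) =>
        ys ++ [(ms.map (fun fr => if fr ≤ f then (1 : Int) else 0)).sum]) _ _ _
  rw [hsplit, PySem.List.foldl_append_singleton_eq_self,
    PySem.List.foldl_append_singleton_eq_map
      (f := fun f => (ms.map (fun fr => if fr ≤ f then (1 : Int) else 0)).sum)]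
  simp only [List.nil_append, pvBucket_eq ms]
  rw [pvBloop (ms.map pvClamp)
    (by intro m hm
        simp only [List.mem_map] at hm
        obtain ⟨a, _, rfl⟩ := hm
        unfold pvClamp; omega) n]
  refine Prod.ext rfl ?_
  simp only
  refine List.map_congr_left ?_
  intro f hf
  have hf1 : (1 : Int) ≤ f := (PySem.List.mem_pyRange_one.mp hf).1
  rw [pvClamp_countP ms f hf1,
    show (fun fr => if fr ≤ f then (1 : Int) else 0)
        = (fun fr => if (fun m : Int => decide (m ≤ f)) fr = true then (1 : Int) else 0) from by
      funext fr; simp,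
    PySem.List.sum_map_ite_one_zero]

-- ===== VERDICT (by name: the statement is the Claim_ definition above) =====
theorem compute_fibers_tracked_by_frame_spec : Claim_equal_compute_fibers_tracked_by_frame := by
  intro datos _ _
  show compute_fibers_tracked_by_frame datos = compute_fibers_tracked_by_frame_alt datos
  simp only [compute_fibers_tracked_by_frame, compute_fibers_tracked_by_frame_alt,
    pvA_fold, pvB_fold]
  have hnd : (((PySem.Dict.ofList datos).items).map (fun p => p.1)).Nodup :=
    PySem.Dict.nodup_keys_ofList datos
  rw [pvVals _ hnd]
  have hg : 0 ≤ ((PySem.Dict.ofList datos).items).foldl pvGStep 0 :=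
    pvG_nonneg _ 0 le_rfl
  obtain ⟨n, hn⟩ : ∃ n : Nat, ((PySem.Dict.ofList datos).items).foldl pvGStep 0 = (n : Int) :=
    ⟨_, (Int.toNat_of_nonneg hg).symm⟩
  rw [hn]
  exact pvSecond _ n
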